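-- pv_equiv track=rewrite | github.com/deepeshyadav760/Valimiki_Ramayana_FactChecker | ramayana_verify.py | extract_key_entities_and_relations
-- ===== SOURCE A (Python) =====
-- def extract_key_entities_and_relations(statement):
--     """
--     Extract key entities and their relationships from the statement
--     """
--     statement_lower = statement.lower()
--
--     # Extract entities
--     entities = []
--     entity_patterns = [
--         'rama', 'sita', 'lakshmana', 'hanuman', 'ravana', 'bharata',
--         'dasharatha', 'kaikeyi', 'sugreeva', 'vibhishana', 'indrajit',
--         'kumbhakarna', 'vishwamitra', 'janaka', 'ayodhya', 'lanka'
--     ]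
--
--     for entity in entity_patterns:
--         if entity in statement_lower:
--             entities.append(entity)
--
--     # Extract relationships and actions
--     relations = []
--
--     # Family relations
--     if 'son' in statement_lower or 'father' in statement_lower:
--         relations.append('family')
--     if 'brother' in statement_lower or 'sister' in statement_lower:
--         relations.append('sibling')
--     if 'married' in statement_lower or 'wife' in statement_lower or 'husband' in statement_lower:
--         relations.append('marriage')
--
--     # Actions
--     if any(word in statement_lower for word in ['killed', 'defeated', 'fought', 'battle']):
--         relations.append('conflict')
--     if any(word in statement_lower for word in ['helped', 'supported', 'assisted', 'ally']):
--         relations.append('alliance')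
--     if any(word in statement_lower for word in ['built', 'constructed', 'made']):
--         relations.append('creation')
--     if any(word in statement_lower for word in ['kidnapped', 'abducted', 'took']):
--         relations.append('abduction')
--     if any(word in statement_lower for word in ['friend', 'friendship']):
--         relations.append('friendship')
--     if any(word in statement_lower for word in ['disciple', 'student', 'learned', 'taught']):
--         relations.append('teaching')
--
--     return entities, relations
-- ===== SOURCE B (Python) =====
-- ENTITY_PATTERNS = [
--     'rama', 'sita', 'lakshmana', 'hanuman', 'ravana', 'bharata',
--     'dasharatha', 'kaikeyi', 'sugreeva', 'vibhishana', 'indrajit',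
--     'kumbhakarna', 'vishwamitra', 'janaka', 'ayodhya', 'lanka'
-- ]
--
-- RELATION_TABLE = [
--     ('family', ['son', 'father']),
--     ('sibling', ['brother', 'sister']),
--     ('marriage', ['married', 'wife', 'husband']),
--     ('conflict', ['killed', 'defeated', 'fought', 'battle']),
--     ('alliance', ['helped', 'supported', 'assisted', 'ally']),
--     ('creation', ['built', 'constructed', 'made']),
--     ('abduction', ['kidnapped', 'abducted', 'took']),
--     ('friendship', ['friend', 'friendship']),
--     ('teaching', ['disciple', 'student', 'learned', 'taught']),
-- ]
--
-- ALL_KEYWORDS = ENTITY_PATTERNS + [w for _, ws in RELATION_TABLE for w in ws]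
--
--
-- def _matched_keywords(s):
--     # One left-to-right scan of the text: at each position record every keyword
--     # that starts there.  A (nonempty) keyword occurs as a substring of s iff it
--     # starts at some position 0 <= i < len(s).
--     matched = set()
--     for i in range(len(s)):
--         for p in ALL_KEYWORDS:
--             if s.startswith(p, i):
--                 matched.add(p)
--     return matched
--
--
-- def extract_key_entities_and_relations(statement):
--     matched = _matched_keywords(statement.lower())
--     entities = [e for e in ENTITY_PATTERNS if e in matched]
--     relations = [label for label, ws in RELATION_TABLE if any(w in matched for w in ws)]
--     return entities, relations
-- ===== Notes on version B (the rewrite author's own statement) =====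
-- stated objective: alternative
-- what changed: Instead of running a separate whole-string substring search per keyword, B makes a single left-to-right scan over the lowered text, recording at each position every keyword that starts there into one matched-set, and then derives entities and relations by set lookups against that set.
import Mathlib
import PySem

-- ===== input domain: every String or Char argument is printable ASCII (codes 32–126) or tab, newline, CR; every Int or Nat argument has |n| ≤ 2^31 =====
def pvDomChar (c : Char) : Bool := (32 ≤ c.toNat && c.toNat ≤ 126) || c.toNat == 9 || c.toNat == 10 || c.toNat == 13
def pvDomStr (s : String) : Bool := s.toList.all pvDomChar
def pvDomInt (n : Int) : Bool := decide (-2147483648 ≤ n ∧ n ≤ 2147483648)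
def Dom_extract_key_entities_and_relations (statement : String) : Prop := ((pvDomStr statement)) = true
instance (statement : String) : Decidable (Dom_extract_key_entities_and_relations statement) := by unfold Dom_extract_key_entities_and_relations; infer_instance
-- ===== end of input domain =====

-- B replaces A's per-keyword substring searches by a single left-to-right scan of the
-- lowered text that collects every keyword starting at each position into one matched
-- set, from which entities and relations are read off (objective: alternative algorithm).


-- ===== PORT A =====
def extract_key_entities_and_relations (statement : String) : List String × List String :=
  let statement_lower := PySem.Str.lower statement
  let entity_patterns : List String :=
    ["rama", "sita", "lakshmana", "hanuman", "ravana", "bharata",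
     "dasharatha", "kaikeyi", "sugreeva", "vibhishana", "indrajit",
     "kumbhakarna", "vishwamitra", "janaka", "ayodhya", "lanka"]
  let entities := entity_patterns.foldl
    (fun acc entity => if PySem.Str.isIn entity statement_lower then acc ++ [entity] else acc) []
  let relations : List String := []
  let relations := if PySem.Str.isIn "son" statement_lower || PySem.Str.isIn "father" statement_lower then relations ++ ["family"] else relations
  let relations := if PySem.Str.isIn "brother" statement_lower || PySem.Str.isIn "sister" statement_lower then relations ++ ["sibling"] else relations
  let relations := if PySem.Str.isIn "married" statement_lower || PySem.Str.isIn "wife" statement_lower || PySem.Str.isIn "husband" statement_lower then relations ++ ["marriage"] else relations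
  let relations := if (["killed", "defeated", "fought", "battle"] : List String).any (fun word => PySem.Str.isIn word statement_lower) then relations ++ ["conflict"] else relations
  let relations := if (["helped", "supported", "assisted", "ally"] : List String).any (fun word => PySem.Str.isIn word statement_lower) then relations ++ ["alliance"] else relations
  let relations := if (["built", "constructed", "made"] : List String).any (fun word => PySem.Str.isIn word statement_lower) then relations ++ ["creation"] else relations
  let relations := if (["kidnapped", "abducted", "took"] : List String).any (fun word => PySem.Str.isIn word statement_lower) then relations ++ ["abduction"] else relations
  let relations := if (["friend", "friendship"] : List String).any (fun word => PySem.Str.isIn word statement_lower) then relations ++ ["friendship"] else relations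
  let relations := if (["disciple", "student", "learned", "taught"] : List String).any (fun word => PySem.Str.isIn word statement_lower) then relations ++ ["teaching"] else relations
  (entities, relations)

-- ===== PORT B =====
def pvEntityPatterns : List String :=
  ["rama", "sita", "lakshmana", "hanuman", "ravana", "bharata",
   "dasharatha", "kaikeyi", "sugreeva", "vibhishana", "indrajit",
   "kumbhakarna", "vishwamitra", "janaka", "ayodhya", "lanka"]

def pvRelationTable : List (String × List String) :=
  [("family", ["son", "father"]),
   ("sibling", ["brother", "sister"]),
   ("marriage", ["married", "wife", "husband"]),
   ("conflict", ["killed", "defeated", "fought", "battle"]),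
   ("alliance", ["helped", "supported", "assisted", "ally"]),
   ("creation", ["built", "constructed", "made"]),
   ("abduction", ["kidnapped", "abducted", "took"]),
   ("friendship", ["friend", "friendship"]),
   ("teaching", ["disciple", "student", "learned", "taught"])]

def pvAllKeywords : List String := pvEntityPatterns ++ pvRelationTable.flatMap Prod.snd

-- Source B's _matched_keywords: one scan over range(len(s)); Python's s.startswith(p, i)
-- for 0 ≤ i < len(s) is exactly 'p.toList is a prefix of s.toList.drop i.toNat'.
def pvMatchedKeywords (s : String) : PySem.Set String :=
  (PySem.List.pyRange 0 (PySem.Str.len s) 1).foldl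
    (fun m i => pvAllKeywords.foldl
      (fun m p => if PySem.Chars.startswith (s.toList.drop i.toNat) p.toList then PySem.Set.add m p else m) m)
    PySem.Set.empty

def extract_key_entities_and_relations_alt (statement : String) : List String × List String :=
  let matched := pvMatchedKeywords (PySem.Str.lower statement)
  (pvEntityPatterns.filter (fun e => PySem.Set.contains matched e),
   (pvRelationTable.filter (fun p => p.2.any (fun w => PySem.Set.contains matched w))).map Prod.fst)

-- ===== PRECONDITION & SPEC =====
def Spec_extract_key_entities_and_relations (statement : String) (out : List String × List String) : Prop := out = extract_key_entities_and_relations_alt statement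
instance (statement : String) (out : List String × List String) : Decidable (Spec_extract_key_entities_and_relations statement out) := by unfold Spec_extract_key_entities_and_relations; infer_instance

-- ===== CLAIM (what is proved, stated in full; the proofs are below) =====
def Claim_equal_extract_key_entities_and_relations : Prop := ∀ (statement : String), Dom_extract_key_entities_and_relations statement → Spec_extract_key_entities_and_relations statement (extract_key_entities_and_relations statement)

-- ===== LEMMAS AND PROOFS =====

-- membership in the inner keyword fold
theorem pv_mem_inner (q : String → Bool) (ks : List String) (m : PySem.Set String) (x : String) :
    x ∈ ks.foldl (fun m p => if q p then PySem.Set.add m p else m) m ↔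
      x ∈ m ∨ (x ∈ ks ∧ q x = true) := by
  induction ks generalizing m with
  | nil => simp
  | cons k ks ih =>
    simp only [List.foldl_cons, ih, List.mem_cons]
    by_cases hq : q k = true
    · simp only [hq, if_pos]
      rw [PySem.Set.mem_add]
      constructor
      · rintro ((h | h) | h)
        · exact Or.inl h
        · exact Or.inr ⟨Or.inl h, h ▸ hq⟩
        · exact Or.inr ⟨Or.inr h.1, h.2⟩
      · rintro (h | ⟨(h | h), hx⟩)
        · exact Or.inl (Or.inl h)
        · exact Or.inl (Or.inr h)
        · exact Or.inr ⟨h, hx⟩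
    · rw [if_neg hq]
      constructor
      · rintro (h | h)
        · exact Or.inl h
        · exact Or.inr ⟨Or.inr h.1, h.2⟩
      · rintro (h | ⟨(h | h), hx⟩)
        · exact Or.inl h
        · exact (hq (h ▸ hx)).elim
        · exact Or.inr ⟨h, hx⟩

-- membership in the whole scan
theorem pv_mem_scan (q : Int → String → Bool) (l : List Int) (m : PySem.Set String) (x : String) :
    x ∈ l.foldl (fun m i => pvAllKeywords.foldl
        (fun m p => if q i p then PySem.Set.add m p else m) m) m ↔
      x ∈ m ∨ ∃ i ∈ l, x ∈ pvAllKeywords ∧ q i x = true := by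
  induction l generalizing m with
  | nil => simp
  | cons i l ih =>
    simp only [List.foldl_cons, ih, pv_mem_inner, List.mem_cons]
    constructor
    · rintro ((h | ⟨hk, hq⟩) | ⟨j, hj, hk, hq⟩)
      · exact Or.inl h
      · exact Or.inr ⟨i, Or.inl rfl, hk, hq⟩
      · exact Or.inr ⟨j, Or.inr hj, hk, hq⟩
    · rintro (h | ⟨j, (rfl | hj), hk, hq⟩)
      · exact Or.inl (Or.inl h)
      · exact Or.inl (Or.inr ⟨hk, hq⟩)
      · exact Or.inr ⟨j, hj, hk, hq⟩

-- every keyword is nonempty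
theorem pv_all_nonempty : ∀ x ∈ pvAllKeywords, x.toList ≠ [] := by decide

-- the matched set answers exactly the substring question, for the table's keywords
theorem pv_contains_matched (s x : String) (hx : x ∈ pvAllKeywords) :
    PySem.Set.contains (pvMatchedKeywords s) x = PySem.Str.isIn x s := by
  have h0 : x.toList ≠ [] := pv_all_nonempty x hx
  have hlen : PySem.Str.len s = (s.toList.length : Int) := by
    simp [PySem.Str.len_eq]
  by_cases h : PySem.Str.isIn x s = true
  · rw [h, PySem.Set.contains_iff]
    rw [PySem.Str.isIn_eq] at h
    obtain ⟨j, hj⟩ :=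
      (PySem.Chars.exists_prefix_drop_iff_isIn (sub := x.toList) (s := s.toList)).2 h
    have hjlt : j < s.toList.length := by
      by_contra hge
      rw [Nat.not_lt] at hge
      rw [List.drop_eq_nil_of_le hge] at hj
      exact h0 (List.prefix_nil.mp hj)
    unfold pvMatchedKeywords
    rw [pv_mem_scan]
    refine Or.inr ⟨(j : Int), ?_, hx, ?_⟩
    · rw [PySem.List.mem_pyRange_one, hlen]
      exact ⟨Int.natCast_nonneg j, by exact_mod_cast hjlt⟩
    · rw [Int.toNat_natCast]
      exact (PySem.Chars.startswith_iff _ _).2 hj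
  · rw [Bool.not_eq_true] at h
    rw [h, ← Bool.not_eq_true]
    intro hmem
    rw [PySem.Set.contains_iff] at hmem
    unfold pvMatchedKeywords at hmem
    rw [pv_mem_scan] at hmem
    rcases hmem with h' | ⟨i, _, _, hq⟩
    · simp [PySem.Set.empty] at h'
    · have hin : PySem.Str.isIn x s = true := by
        rw [PySem.Str.isIn_eq]
        exact (PySem.Chars.exists_prefix_drop_iff_isIn (sub := x.toList) (s := s.toList)).1
          ⟨i.toNat, (PySem.Chars.startswith_iff _ _).1 hq⟩
      rw [h] at hin
      exact Bool.false_ne_true hin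

-- keyword-membership side conditions (closed computations)
theorem pv_entity_mem : ∀ e ∈ pvEntityPatterns, e ∈ pvAllKeywords := by decide
theorem pv_word_mem : ∀ p ∈ pvRelationTable, ∀ w ∈ p.2, w ∈ pvAllKeywords := by decide

-- A's let-chain of conditional appends equals the concatenation of singleton-ifs
theorem pv_rel (c1 c2 c3 c4 c5 c6 c7 c8 c9 : Bool) :
    (let r : List String := []
     let r := if c1 then r ++ ["family"] else r
     let r := if c2 then r ++ ["sibling"] else r
     let r := if c3 then r ++ ["marriage"] else r
     let r := if c4 then r ++ ["conflict"] else r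
     let r := if c5 then r ++ ["alliance"] else r
     let r := if c6 then r ++ ["creation"] else r
     let r := if c7 then r ++ ["abduction"] else r
     let r := if c8 then r ++ ["friendship"] else r
     let r := if c9 then r ++ ["teaching"] else r
     r)
    = (if c1 then ["family"] else []) ++
      ((if c2 then ["sibling"] else []) ++
      ((if c3 then ["marriage"] else []) ++
      ((if c4 then ["conflict"] else []) ++
      ((if c5 then ["alliance"] else []) ++
      ((if c6 then ["creation"] else []) ++
      ((if c7 then ["abduction"] else []) ++
      ((if c8 then ["friendship"] else []) ++
       (if c9 then ["teaching"] else [])))))))) := by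
  cases c1 <;> cases c2 <;> cases c3 <;> cases c4 <;> cases c5 <;> cases c6 <;> cases c7 <;>
    cases c8 <;> cases c9 <;> rfl

-- B's filter-then-map over a cons of the table, one step
theorem pv_filter_map_cons (q : String × List String → Bool) (l : String) (ws : List String)
    (rest : List (String × List String)) :
    (((l, ws) :: rest).filter q).map Prod.fst
      = (if q (l, ws) then [l] else []) ++ (rest.filter q).map Prod.fst := by
  by_cases h : q (l, ws) = true <;> simp [h]

theorem extract_key_entities_and_relations_spec : Claim_equal_extract_key_entities_and_relations := by
  intro statement _
  unfold Spec_extract_key_entities_and_relations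
  unfold extract_key_entities_and_relations extract_key_entities_and_relations_alt
  dsimp only
  have hkey : ∀ x ∈ pvAllKeywords,
      PySem.Set.contains (pvMatchedKeywords (PySem.Str.lower statement)) x
        = PySem.Str.isIn x (PySem.Str.lower statement) :=
    fun x hx => pv_contains_matched (PySem.Str.lower statement) x hx
  refine Prod.ext ?_ ?_ <;> dsimp only
  · simp only [PySem.List.foldl_append_if, List.nil_append, List.map_id']
    exact (List.filter_congr fun e he => hkey e (pv_entity_mem e he)).symm
  · have htab : pvRelationTable.filter
        (fun p => p.2.any (fun w => PySem.Set.contains (pvMatchedKeywords (PySem.Str.lower statement)) w))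
        = pvRelationTable.filter (fun p => p.2.any (fun w => PySem.Str.isIn w (PySem.Str.lower statement))) :=
      List.filter_congr fun p hp =>
        PySem.List.any_congr_mem fun w hw => hkey w (pv_word_mem p hp w hw)
    rw [htab]
    simp only [pvRelationTable, pv_filter_map_cons, List.filter_nil, List.map_nil,
      List.any_cons, List.any_nil, Bool.or_false, Bool.or_assoc, List.append_nil]
    exact pv_rel _ _ _ _ _ _ _ _ _

-- ===== VERDICT (by name: the statement is the Claim_ definition above) =====
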